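-- pv_equiv track=rewrite | github.com/Valci2/minha-evolucao-na-cadeira-de-introducao-a-programacao | Exercicios/lista 6/ex 1.py | descriptografia
-- ===== SOURCE A (Python) =====
-- def descriptografia(criptografia):
--     '''Faz a descriptografia do nome forcecido pelo usuario
--
--     argumentos:
--         criptografia (str): recebe um nome que esteja criptografado
--
--     retorna:
--         descriptografia (str): retorna o nome descriptografado
--     '''
--     # lista ascii para descriptografia
--     ascii_chars = [
--     ' ', '!', '"', '#', '$', '%', '&', "'", '(', ')', '*', '+', ',', '-', '.', '/',
--     '0', '1', '2', '3', '4', '5', '6', '7', '8', '9', ':', ';', '<', '=', '>', '?',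
--     '@', 'A', 'B', 'C', 'D', 'E', 'F', 'G', 'H', 'I', 'J', 'K', 'L', 'M', 'N', 'O',
--     'P', 'Q', 'R', 'S', 'T', 'U', 'V', 'W', 'X', 'Y', 'Z', '[', '\\', ']', '^', '_',
--     '`', 'a', 'b', 'c', 'd', 'e', 'f', 'g', 'h', 'i', 'j', 'k', 'l', 'm', 'n', 'o',
--     'p', 'q', 'r', 's', 't', 'u', 'v', 'w', 'x', 'y', 'z', '{', '|', '}', '~'
--     ]
--
--     # variaveis que vão receber strings depois
--     segunda_metade_com_shift = ''
--     descriptografia = ''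
--
--     # pega a exatamente a medade da quantidades de letras que tem na string
--     metade = len(criptografia) // 2
--     primeira_metade = criptografia[:metade] # divide entra a primeira (caso a quantidade de letras seja impar ele pega menos uma letra)
--     segunda_metade = criptografia[metade:] # e a segunda metade da string
--
--     # pega o index cada letras da segunda parte e para pegar a proxima letra da lista ascii
--     for letras in segunda_metade:
--         index_na_lista = ascii_chars.index(letras)
--         if index_na_lista == 94:
--             index_na_lista = -1
--         segunda_metade_com_shift += ascii_chars[index_na_lista + 1]
--
--     # junta a primeira parte (original) e a segunda parte (com shift +1)
--     tudo_junto = primeira_metade + segunda_metade_com_shift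
--     tudo_junto = tudo_junto[::-1] # pega a junção e inverte
--
--     # pega todas as letras do string completa e faz um shift (-3) para chegarmos na descriptografia
--     for letras in tudo_junto:
--         index_na_lista = ascii_chars.index(letras)
--         if index_na_lista == 2:
--             index_na_lista = 91
--         elif index_na_lista == 1:
--             index_na_lista = 90
--         elif index_na_lista == 0:
--             index_na_lista = 89
--         descriptografia += ascii_chars[index_na_lista - 3]
--
--     # retorna a palavra descriptografada
--     return descriptografia
-- ===== SOURCE B (Python) =====
-- def descriptografia(criptografia):
--     '''Descriptografa em uma unica passada sobre as posicoes da string, de tras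
--     para frente, sem construir as metades intermediarias nem inverter depois.'''
--     ascii_chars = [
--     ' ', '!', '"', '#', '$', '%', '&', "'", '(', ')', '*', '+', ',', '-', '.', '/',
--     '0', '1', '2', '3', '4', '5', '6', '7', '8', '9', ':', ';', '<', '=', '>', '?',
--     '@', 'A', 'B', 'C', 'D', 'E', 'F', 'G', 'H', 'I', 'J', 'K', 'L', 'M', 'N', 'O',
--     'P', 'Q', 'R', 'S', 'T', 'U', 'V', 'W', 'X', 'Y', 'Z', '[', '\\', ']', '^', '_',
--     '`', 'a', 'b', 'c', 'd', 'e', 'f', 'g', 'h', 'i', 'j', 'k', 'l', 'm', 'n', 'o',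
--     'p', 'q', 'r', 's', 't', 'u', 'v', 'w', 'x', 'y', 'z', '{', '|', '}', '~'
--     ]
--
--     def shift_mais_um(letra):
--         i = ascii_chars.index(letra)
--         if i == 94:
--             i = -1
--         return ascii_chars[i + 1]
--
--     def shift_menos_tres(letra):
--         i = ascii_chars.index(letra)
--         if i == 2:
--             i = 91
--         elif i == 1:
--             i = 90
--         elif i == 0:
--             i = 89
--         return ascii_chars[i - 3]
--
--     metade = len(criptografia) // 2
--     resultado = []
--     for j, letra in reversed(list(enumerate(criptografia))):
--         if j >= metade:
--             letra = shift_mais_um(letra)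
--         resultado.append(shift_menos_tres(letra))
--     return ''.join(resultado)
-- ===== Notes on version B (the rewrite author's own statement) =====
-- stated objective: alternative
-- what changed: B produces the output in one backward pass over the enumerated input, applying the +1 shift (for second-half positions) and the -3 shift per character on the fly, eliminating A's intermediate shifted-second-half string, the concatenation and the explicit [::-1] reversal.
import Mathlib
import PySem

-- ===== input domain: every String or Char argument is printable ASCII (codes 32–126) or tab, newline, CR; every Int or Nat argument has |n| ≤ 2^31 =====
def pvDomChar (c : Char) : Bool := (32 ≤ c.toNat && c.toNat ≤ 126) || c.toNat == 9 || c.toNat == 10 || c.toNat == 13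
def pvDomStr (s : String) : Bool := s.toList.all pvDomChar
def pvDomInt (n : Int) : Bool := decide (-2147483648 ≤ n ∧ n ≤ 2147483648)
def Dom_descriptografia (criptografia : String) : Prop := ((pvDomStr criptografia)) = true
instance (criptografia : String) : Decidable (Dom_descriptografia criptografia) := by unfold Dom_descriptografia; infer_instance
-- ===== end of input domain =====

-- B decrypts in one backward pass over the enumerated input (per-position mirrored shift),
-- instead of A's build-shifted-second-half + concatenate + reverse + second pass; objective: alternative.


-- ===== PORT A =====
-- the literal ascii_chars table of the Python (codes 32..126, in order)
def asciiChars : List Char :=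
  (" !\"#$%&'()*+,-./0123456789:;<=>?@ABCDEFGHIJKLMNOPQRSTUVWXYZ[\\]^_`abcdefghijklmnopqrstuvwxyz{|}~").toList

-- the +1 shift of A's first loop (ascii_chars.index; index 94 becomes -1; then +1).
-- ValueError (letter not in table) is excluded by Pre_; the `.getD` defaults are never reached there.
def shiftMaisUm (letra : Char) : Char :=
  match PySem.List.index? asciiChars letra with
  | none => letra
  | some i0 =>
    let i : Int := if i0 = 94 then -1 else (i0 : Int)
    (PySem.List.pyGet? asciiChars (i + 1)).getD letra

-- the -3 shift of A's second loop (indices 2/1/0 remapped to 91/90/89; then -3)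
def shiftMenosTres (letra : Char) : Char :=
  match PySem.List.index? asciiChars letra with
  | none => letra
  | some i0 =>
    let i : Int := if i0 = 2 then 91 else if i0 = 1 then 90 else if i0 = 0 then 89 else (i0 : Int)
    (PySem.List.pyGet? asciiChars (i - 3)).getD letra

def descriptografia (criptografia : String) : String :=
  let xs := criptografia.toList
  let metade := xs.length / 2                      -- len(criptografia) // 2 (nonnegative)
  let primeira := xs.take metade                   -- criptografia[:metade]
  let segunda := xs.drop metade                    -- criptografia[metade:]
  let segundaComShift := segunda.foldl (fun acc c => acc ++ [shiftMaisUm c]) []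
  let tudoJunto := (primeira ++ segundaComShift).reverse   -- concatenation, then [::-1]
  let out := tudoJunto.foldl (fun acc c => acc ++ [shiftMenosTres c]) []
  String.ofList out

-- ===== PORT B =====
def descriptografia_alt (criptografia : String) : String :=
  let xs := criptografia.toList
  let metade := xs.length / 2
  let out := ((PySem.List.enumerate xs).reverse).foldl
    (fun acc p =>
      acc ++ [shiftMenosTres (if (metade : Int) ≤ p.1 then shiftMaisUm p.2 else p.2)]) []
  String.ofList out

-- ===== PRECONDITION & SPEC =====
-- Pre_ excludes exactly the strings containing a character outside codes 32..126
-- (tab/newline/CR etc.), on which A's `ascii_chars.index` raises ValueError.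
def Pre_descriptografia (criptografia : String) : Prop :=
  criptografia.toList.all (fun c => 32 ≤ c.toNat && c.toNat ≤ 126) = true
instance (criptografia : String) : Decidable (Pre_descriptografia criptografia) := by
  unfold Pre_descriptografia; infer_instance
def pvWitness_descriptografia : String := "Khoor"

def Spec_descriptografia (criptografia : String) (out : String) : Prop := out = descriptografia_alt criptografia
instance (criptografia : String) (out : String) : Decidable (Spec_descriptografia criptografia out) := by unfold Spec_descriptografia; infer_instance

-- ===== CLAIM (what is proved, stated in full; the proofs are below) =====
def Claim_equal_descriptografia : Prop := ∀ (criptografia : String), Dom_descriptografia criptografia → Pre_descriptografia criptografia → Spec_descriptografia criptografia (descriptografia criptografia)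

-- ===== LEMMAS AND PROOFS =====

-- A map over an enumeration that ignores/uses indices uniformly collapses to a map over the list.
lemma map_enum_of_forall {a b : Type} (l : List a) (s : Int) (F : Int × a → b) (g : a → b)
    (h : ∀ p ∈ PySem.List.enumerate l s, F p = g p.2) :
    (PySem.List.enumerate l s).map F = l.map g := by
  rw [List.map_congr_left h,
    show (fun p : Int × a => g p.2) = g ∘ (fun p : Int × a => p.2) from rfl,
    ← List.map_map, PySem.List.map_snd_enumerate]

-- Splitting a map over an enumeration at index m: positions below m get g, positions from m on get f.
lemma enum_map_split (xs : List Char) (m : Nat) (hm : m ≤ xs.length) (f g : Char → Char) :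
    (PySem.List.enumerate xs).map (fun p => if (m : Int) ≤ p.1 then f p.2 else g p.2)
      = (xs.take m).map g ++ (xs.drop m).map f := by
  conv_lhs => rw [← List.take_append_drop m xs]
  rw [PySem.List.enumerate_append, List.map_append]
  have hlen : (xs.take m).length = m := by simp [List.length_take, Nat.min_eq_left hm]
  congr 1
  · apply map_enum_of_forall
    intro p hp
    obtain ⟨k, hk, rfl⟩ := (PySem.List.mem_enumerate_iff _ _ _).1 hp
    have hkm : k < m := hlen ▸ hk
    have hcond : ¬ ((m : Int) ≤ 0 + (k : Int)) := by omega
    exact if_neg hcond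
  · apply map_enum_of_forall
    intro p hp
    obtain ⟨k, hk, rfl⟩ := (PySem.List.mem_enumerate_iff _ _ _).1 hp
    have hcond : (m : Int) ≤ 0 + ((xs.take m).length : Int) + (k : Int) := by
      rw [hlen]; omega
    exact if_pos hcond

-- ===== VERDICT (by name: the statement is the Claim_ definition above) =====
theorem descriptografia_spec : Claim_equal_descriptografia := by
  intro s _ _
  unfold Spec_descriptografia descriptografia descriptografia_alt
  simp only [PySem.List.foldl_append_singleton_eq_map, List.nil_append]
  congr 1
  simp only [List.map_reverse]
  congr 1
  symm
  rw [List.map_congr_left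
      (g := fun p : Int × Char => if ((s.toList.length / 2 : Nat) : Int) ≤ p.1
              then shiftMenosTres (shiftMaisUm p.2) else shiftMenosTres p.2)
      (fun p _ => by exact apply_ite shiftMenosTres _ _ _),
    enum_map_split s.toList (s.toList.length / 2) (Nat.div_le_self _ _)
      (fun c => shiftMenosTres (shiftMaisUm c)) shiftMenosTres,
    List.map_append, List.map_map]
  rfl
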